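-- pv_equiv track=rewrite | github.com/keshrisohit/omniforge | src/omniforge/prompts/validation/safety.py | _limit_repetition
-- ===== SOURCE A (Python) =====
-- def _limit_repetition(text: str, max_consecutive: int = 5) -> str:
--     """Limit consecutive character repetition to prevent flooding attacks.
--
--     Args:
--         text: Input text
--         max_consecutive: Maximum allowed consecutive repetitions
--
--     Returns:
--         Text with limited repetition
--
--     Example:
--         >>> validator = SafetyValidator()
--         >>> validator._limit_repetition("aaaaaaaa", max_consecutive=3)
--         'aaa'
--     """
--     if not text:
--         return text
--
--     result = []
--     prev_char = None
--     count = 0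
--
--     for char in text:
--         if char == prev_char:
--             count += 1
--             if count <= max_consecutive:
--                 result.append(char)
--         else:
--             result.append(char)
--             prev_char = char
--             count = 1
--
--     return "".join(result)
-- ===== SOURCE B (Python) =====
-- def _limit_repetition(text: str, max_consecutive: int = 5) -> str:
--     # Run-based two-pointer rewrite: find each maximal run of equal characters
--     # and emit min(run_length, max(max_consecutive, 1)) copies of its character
--     # (A always keeps the first char of a run, hence the clamp to at least 1).
--     cap = max(max_consecutive, 1)
--     out = []
--     i = 0
--     n = len(text)
--     while i < n:
--         c = text[i]
--         j = i
--         while j < n and text[j] == c: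
--             j += 1
--         out.append(c * min(j - i, cap))
--         i = j
--     return "".join(out)
-- ===== Notes on version B (the rewrite author's own statement) =====
-- stated objective: alternative
-- what changed: Replaces A's per-character state machine (prev_char/count flags deciding whether to append each char) with a run-based two-pointer scan: find each maximal run of equal characters and emit min(run_length, max(max_consecutive, 1)) copies of its character at once.
import Mathlib
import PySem

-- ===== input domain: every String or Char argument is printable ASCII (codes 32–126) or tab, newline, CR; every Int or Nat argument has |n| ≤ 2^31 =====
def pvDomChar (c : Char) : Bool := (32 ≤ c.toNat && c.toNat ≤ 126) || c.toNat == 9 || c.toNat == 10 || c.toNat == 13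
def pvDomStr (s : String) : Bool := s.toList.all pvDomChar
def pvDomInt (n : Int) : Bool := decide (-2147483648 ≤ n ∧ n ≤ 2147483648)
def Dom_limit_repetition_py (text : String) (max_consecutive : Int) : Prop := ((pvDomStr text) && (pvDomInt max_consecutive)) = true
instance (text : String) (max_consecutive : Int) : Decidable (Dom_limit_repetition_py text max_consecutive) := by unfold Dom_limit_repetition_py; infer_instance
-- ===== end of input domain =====

-- B replaces A's per-character prev/count state machine by a run-based two-pointer scan
-- (find each maximal run, emit min(run_length, max(max_consecutive,1)) copies); alternative structure, linear like A.


-- ===== PORT A =====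
-- the for-loop of A, with state (result, prev_char, count); branches in source order
def pvALoop (mc : Int) : List Char → List Char → Option Char → Int → List Char
  | [], result, _, _ => result
  | ch :: rest, result, prev, count =>
    if some ch = prev then
      let count := count + 1
      if count ≤ mc then pvALoop mc rest (result ++ [ch]) prev count
      else pvALoop mc rest result prev count
    else pvALoop mc rest (result ++ [ch]) (some ch) 1

def limit_repetition_py (text : String) (max_consecutive : Int) : String :=
  if text = "" then text
  else String.mk (pvALoop max_consecutive text.toList [] none 0)

-- ===== PORT B =====
-- inner while of B: advance j while j < n and text[j] == c (the index stays in range: j < n is checked first)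
def pvBInner (chars : List Char) (n : Nat) (c : Char) (j : Nat) : Nat :=
  if h : j < n ∧ chars.getD j ' ' == c then pvBInner chars n c (j + 1) else j
termination_by n - j
decreasing_by omega

-- the inner while never moves j backwards (used only for B's own termination)
lemma pvBInner_ge (chars : List Char) (n : Nat) (c : Char) :
    ∀ (k j : Nat), n - j ≤ k → j ≤ pvBInner chars n c j := by
  intro k
  induction k with
  | zero =>
    intro j hj
    rw [pvBInner, dif_neg (by omega)]
  | succ k ih =>
    intro j hj
    rw [pvBInner]
    split
    · next h =>
      have := ih (j + 1) (by omega)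
      omega
    · exact le_rfl

-- outer while of B: one maximal run per iteration, emit its clamped copy, jump to its end
def pvBOuter (chars : List Char) (n : Nat) (cap : Int) (i : Nat) : List Char :=
  if h : i < n then
    -- c := text[i]; j := end of the inner while started at i
    List.replicate (min ((pvBInner chars n (chars.getD i ' ') i : Int) - i) cap).toNat (chars.getD i ' ')
      ++ pvBOuter chars n cap (pvBInner chars n (chars.getD i ' ') i)
  else []
termination_by n - i
decreasing_by
  have h1 : pvBInner chars n (chars.getD i ' ') i = pvBInner chars n (chars.getD i ' ') (i + 1) := by
    rw [pvBInner, dif_pos ⟨h, by simp⟩]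
  have h2 := pvBInner_ge chars n (chars.getD i ' ') (n - (i + 1)) (i + 1) le_rfl
  omega

def limit_repetition_py_alt (text : String) (max_consecutive : Int) : String :=
  String.mk (pvBOuter text.toList text.toList.length (max max_consecutive 1) 0)

-- ===== PRECONDITION & SPEC =====
def Spec_limit_repetition_py (text : String) (max_consecutive : Int) (out : String) : Prop := out = limit_repetition_py_alt text max_consecutive
instance (text : String) (max_consecutive : Int) (out : String) : Decidable (Spec_limit_repetition_py text max_consecutive out) := by unfold Spec_limit_repetition_py; infer_instance

-- ===== CLAIM (what is proved, stated in full; the proofs are below) =====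
def Claim_equal_limit_repetition_py : Prop := ∀ (text : String) (max_consecutive : Int), Dom_limit_repetition_py text max_consecutive → Spec_limit_repetition_py text max_consecutive (limit_repetition_py text max_consecutive)

-- ===== LEMMAS AND PROOFS =====

-- proof-side bridge: B's scan expressed as structural recursion over list suffixes (runs via takeWhile/dropWhile)
def pvBScan (cap : Int) : List Char → List Char
  | [] => []
  | c :: rest =>
    let k : Int := 1 + (rest.takeWhile (fun x => x == c)).length
    List.replicate (min k cap).toNat c ++ pvBScan cap (rest.dropWhile (fun x => x == c))
termination_by l => l.length
decreasing_by
  simpa using Nat.lt_succ_of_le (List.length_dropWhile_le _ _)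

-- the inner while computes the end of the maximal run of c starting at j
lemma pvBInner_eq (chars : List Char) (c : Char) :
    ∀ (k j : Nat), chars.length - j ≤ k →
      pvBInner chars chars.length c j = j + ((chars.drop j).takeWhile (fun x => x == c)).length := by
  intro k
  induction k with
  | zero =>
    intro j hj
    rw [pvBInner, dif_neg (by omega), List.drop_eq_nil_of_le (by omega)]
    simp
  | succ k ih =>
    intro j hj
    by_cases hjl : j < chars.length
    · rw [List.drop_eq_getElem_cons hjl]
      have hg : chars.getD j ' ' = chars[j] := List.getD_eq_getElem chars ' ' hjl
      by_cases hc : chars[j] = c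
      · rw [pvBInner, dif_pos ⟨hjl, by rw [hg]; simp [hc]⟩, ih (j + 1) (by omega)]
        rw [List.takeWhile_cons, if_pos (by simp [hc])]
        simp only [List.length_cons]
        omega
      · rw [pvBInner, dif_neg (by rw [hg]; simp [hc])]
        rw [List.takeWhile_cons, if_neg (by simp [hc])]
        simp
    · rw [pvBInner, dif_neg (by omega), List.drop_eq_nil_of_le (by omega)]
      simp

-- l.dropWhile p is l with the takeWhile prefix dropped
lemma dropWhile_eq_drop_len (p : Char → Bool) (l : List Char) :
    l.dropWhile p = l.drop (l.takeWhile p).length := by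
  calc l.dropWhile p = (l.takeWhile p ++ l.dropWhile p).drop (l.takeWhile p).length :=
        (List.drop_left).symm
    _ = l.drop (l.takeWhile p).length := by rw [List.takeWhile_append_dropWhile]

-- B's index loop equals the suffix-recursion scan
lemma pvBOuter_eq_pvBScan (chars : List Char) (cap : Int) :
    ∀ (k i : Nat), chars.length - i ≤ k →
      pvBOuter chars chars.length cap i = pvBScan cap (chars.drop i) := by
  intro k
  induction k with
  | zero =>
    intro i hi
    rw [pvBOuter, dif_neg (by omega), List.drop_eq_nil_of_le (by omega), pvBScan]
  | succ k ih =>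
    intro i hi
    by_cases hil : i < chars.length
    · rw [pvBOuter, dif_pos hil]
      have hg : chars.getD i ' ' = chars[i] := List.getD_eq_getElem chars ' ' hil
      have hstep : pvBInner chars chars.length (chars.getD i ' ') i
          = pvBInner chars chars.length (chars.getD i ' ') (i + 1) := by
        rw [pvBInner, dif_pos ⟨hil, by simp⟩]
      set T := ((chars.drop (i + 1)).takeWhile (fun x => x == chars[i])).length with hT
      have hj : pvBInner chars chars.length (chars.getD i ' ') i = i + 1 + T := by
        rw [hstep, hg, pvBInner_eq chars chars[i] (chars.length - (i + 1)) (i + 1) le_rfl]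
      rw [hj]
      have hk : chars.length - (i + 1 + T) ≤ k := by omega
      rw [ih (i + 1 + T) hk]
      conv_rhs => rw [List.drop_eq_getElem_cons hil]
      rw [pvBScan]
      have hmin : ((i + 1 + T : Nat) : Int) - (i : Nat) = 1 + (T : Int) := by push_cast; omega
      rw [hmin, hg, ← hT]
      have hdrop : chars.drop (i + 1 + T) = (chars.drop (i + 1)).dropWhile (fun x => x == chars[i]) := by
        rw [dropWhile_eq_drop_len, List.drop_drop, ← hT]
      rw [hdrop]
    · rw [pvBOuter, dif_neg (by omega), List.drop_eq_nil_of_le (by omega), pvBScan]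

-- processing a block of m copies of c while prev = some c, count = j ≥ 1
lemma pvALoop_run (mc : Int) (c : Char) (m : Nat) :
    ∀ (rest acc : List Char) (j : Int), 1 ≤ j →
      pvALoop mc (List.replicate m c ++ rest) acc (some c) j
        = pvALoop mc rest (acc ++ List.replicate (min (j + m) (max mc 1) - j).toNat c) (some c) (j + m) := by
  induction m with
  | zero =>
    intro rest acc j hj
    have h0 : (min j (max mc 1) - j).toNat = 0 := by omega
    simp [h0]
  | succ n ih =>
    intro rest acc j hj
    rw [List.replicate_succ, List.cons_append]
    rw [pvALoop]
    by_cases h : j + 1 ≤ mc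
    · rw [if_pos h, ih rest (acc ++ [c]) (j+1) (by omega)]
      have harith : (min (j + 1 + n) (max mc 1) - (j + 1)).toNat + 1
          = (min (j + (n+1:Nat)) (max mc 1) - j).toNat := by
        push_cast; omega
      have hl : (acc ++ [c]) ++ List.replicate (min (j + 1 + n) (max mc 1) - (j + 1)).toNat c
          = acc ++ List.replicate (min (j + (n+1:Nat)) (max mc 1) - j).toNat c := by
        rw [List.append_assoc, ← harith, List.replicate_succ]
        rfl
      rw [hl]
      have : j + 1 + (n:Int) = j + ((n+1:Nat):Int) := by push_cast; omega
      rw [this]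
      simp
    · rw [if_neg h, ih rest acc (j+1) (by omega)]
      have harith : (min (j + 1 + n) (max mc 1) - (j + 1)).toNat
          = (min (j + (n+1:Nat)) (max mc 1) - j).toNat := by
        push_cast; omega
      rw [harith]
      have : j + 1 + (n:Int) = j + ((n+1:Nat):Int) := by push_cast; omega
      rw [this]
      simp

lemma takeWhile_beq_eq_replicate (c : Char) (l : List Char) :
    l.takeWhile (fun x => x == c) = List.replicate (l.takeWhile (fun x => x == c)).length c := by
  apply List.eq_replicate_of_mem
  intro b hb
  have := List.mem_takeWhile_imp hb
  simpa using this

lemma head?_dropWhile_beq (c : Char) (l : List Char) (d : Char)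
    (h : (l.dropWhile (fun x => x == c)).head? = some d) : d ≠ c := by
  induction l with
  | nil => simp at h
  | cons a t ih =>
    rw [List.dropWhile_cons] at h
    by_cases ha : a = c
    · simp [ha] at h
      exact ih h
    · simp [ha] at h
      exact h ▸ ha

lemma pvALoop_eq_pvBScan (mc : Int) :
    ∀ (n : Nat) (l : List Char), l.length ≤ n →
      ∀ (acc : List Char) (prev : Option Char) (count : Int),
      (∀ c, prev = some c → l.head? ≠ some c) →
      pvALoop mc l acc prev count = acc ++ pvBScan (max mc 1) l := by
  intro n
  induction n with
  | zero =>
    intro l hl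
    rw [List.length_eq_zero_iff.mp (Nat.le_zero.mp hl)]
    intro acc prev count _
    simp [pvALoop, pvBScan]
  | succ n ih =>
    intro l hl
    match l with
    | [] => intro acc prev count _; simp [pvALoop, pvBScan]
    | c :: tail =>
      intro acc prev count hhead
      have hne : ¬ some c = prev := by
        intro h
        exact hhead c h.symm (by simp)
      rw [pvALoop, if_neg hne]
      set m := (tail.takeWhile (fun x => x == c)).length with hm
      have hdec : tail = List.replicate m c ++ tail.dropWhile (fun x => x == c) := by
        conv_lhs => rw [← List.takeWhile_append_dropWhile (p := fun x => x == c) (l := tail)]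
        rw [← takeWhile_beq_eq_replicate]
      rw [pvBScan]
      conv_lhs => rw [hdec]
      rw [pvALoop_run mc c m _ _ 1 (by omega)]
      have hlen : (tail.dropWhile (fun x => x == c)).length ≤ n := by
        have := List.length_dropWhile_le (fun x => x == c) tail
        simp at hl; omega
      rw [ih _ hlen _ (some c) _ ?_]
      · simp only [← hm]
        have harith : (min (1 + (m:Int)) (max mc 1) - 1).toNat + 1 = (min (1 + (m:Int)) (max mc 1)).toNat := by omega
        have hrep : (acc ++ [c]) ++ List.replicate (min (1 + (m:Int)) (max mc 1) - 1).toNat c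
            = acc ++ List.replicate (min (1 + (m:Int)) (max mc 1)).toNat c := by
          rw [List.append_assoc, ← harith, List.replicate_succ]
          rfl
        rw [hrep, List.append_assoc]
      · intro d hd
        have hd' : d = c := by injection hd with h; exact h.symm
        subst hd'
        intro hcontra
        exact head?_dropWhile_beq d tail d hcontra rfl

-- ===== VERDICT (by name: the statement is the Claim_ definition above) =====
theorem limit_repetition_py_spec : Claim_equal_limit_repetition_py := by
  intro text mc _
  unfold Spec_limit_repetition_py limit_repetition_py limit_repetition_py_alt
  rw [pvBOuter_eq_pvBScan text.toList (max mc 1) text.toList.length 0 (by omega), List.drop_zero]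
  by_cases h : text = ""
  · subst h; rw [if_pos rfl]; simp [pvBScan]; rfl
  · rw [if_neg h]
    rw [pvALoop_eq_pvBScan mc text.toList.length text.toList le_rfl [] none 0 (by intro c hc; simp at hc)]
    simp
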